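-- pv_equiv track=rewrite | github.com/ranjan-p-mishra/ThesisBDS | predictor.py | _expand_cols
-- ===== SOURCE A (Python) =====
-- from typing import List, Dict, Tuple
--
-- def _canon(name: str) -> str:
--     """Canonicalize column names"""
--     return name.lower().replace("-", "_").replace("=", "_").replace(" ", "_")
--
-- def _expand_cols(bases: List[str], all_cols: List[str]) -> List[str]:
--     """Expand column patterns to actual column names"""
--     canon_map = {_canon(c): c for c in all_cols}
--     out = []
--     for base in bases:
--         key = _canon(base)
--         if key in canon_map:
--             out.append(canon_map[key])
--             continue
--         matches = [c for c in all_cols if _canon(c).startswith(key)]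
--         if not matches:
--             raise KeyError(f"{base!r} not found in dataset columns")
--         out.extend(matches)
--     return list(dict.fromkeys(out))
-- ===== SOURCE B (Python) =====
-- from typing import List
--
-- def _canon(name: str) -> str:
--     """Canonicalize column names"""
--     return name.lower().replace("-", "_").replace("=", "_").replace(" ", "_")
--
-- def _expand_cols(bases: List[str], all_cols: List[str]) -> List[str]:
--     """Expand column patterns to actual column names.
--
--     One preprocessing pass builds an exact-canon dict and a prefix index
--     mapping every prefix of every column's canon to the matching columns
--     (in original column order), so each base is answered by dict lookups
--     instead of a scan over all_cols."""
--     exact = {}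
--     prefix_map = {}
--     for c in all_cols:
--         k = _canon(c)
--         exact[k] = c
--         for j in range(len(k) + 1):
--             prefix_map.setdefault(k[:j], []).append(c)
--     out = []
--     for base in bases:
--         key = _canon(base)
--         if key in exact:
--             out.append(exact[key])
--             continue
--         matches = prefix_map.get(key, [])
--         if not matches:
--             raise KeyError(f"{base!r} not found in dataset columns")
--         out.extend(matches)
--     return list(dict.fromkeys(out))
-- ===== Notes on version B (the rewrite author's own statement) =====
-- stated objective: alternative
-- what changed: B builds in one preprocessing pass a hash index from every prefix of every column's canonical name to its matching columns (plus the exact-canon dict), so each base is answered by two dict lookups instead of re-canonicalizing and scanning all columns per base; per-base cost drops at the price of O(total canon chars) preprocessing.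
import Mathlib
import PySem

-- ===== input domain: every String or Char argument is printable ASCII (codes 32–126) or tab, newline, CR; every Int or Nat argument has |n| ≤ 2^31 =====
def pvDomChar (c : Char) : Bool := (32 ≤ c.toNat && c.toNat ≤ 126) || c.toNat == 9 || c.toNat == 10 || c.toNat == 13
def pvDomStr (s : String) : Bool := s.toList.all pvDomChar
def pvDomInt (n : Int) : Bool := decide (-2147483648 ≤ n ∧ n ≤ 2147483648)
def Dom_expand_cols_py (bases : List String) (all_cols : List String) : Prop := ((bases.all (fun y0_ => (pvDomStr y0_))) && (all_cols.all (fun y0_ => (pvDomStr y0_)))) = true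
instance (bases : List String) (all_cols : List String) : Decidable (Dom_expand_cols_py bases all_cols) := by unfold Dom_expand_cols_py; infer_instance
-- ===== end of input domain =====

-- B replaces A's per-base scan over all_cols with a prefix index built in one
-- preprocessing pass (every prefix of every column's canon → matching columns),
-- so each base is answered by dict lookups (alternative algorithm, same values).

-- ===== PORT A =====
-- helper _canon, shared verbatim by both Pythons
def pyCanon (name : String) : String :=
  PySem.Str.replace (PySem.Str.replace (PySem.Str.replace (PySem.Str.lower name) "-" "_") "=" "_") " " "_"

def expand_cols_py (bases : List String) (all_cols : List String) : List String :=
  -- canon_map = {_canon(c): c for c in all_cols}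
  let canon_map : PySem.Dict String String :=
    all_cols.foldl (fun d c => d.insert (pyCanon c) c) PySem.Dict.empty
  -- for base in bases: exact hit appends canon_map[key], else the prefix scan
  let out : List String :=
    bases.foldl (fun out base =>
      match canon_map.get? (pyCanon base) with
      | some v => out ++ [v]
      | none =>
          -- matches = [c for c in all_cols if _canon(c).startswith(key)];
          -- matches = [] is the KeyError case, excluded by Pre_
          out ++ all_cols.filter (fun c => PySem.Str.startswith (pyCanon c) (pyCanon base))) []
  -- list(dict.fromkeys(out))
  PySem.List.dedup out

-- ===== PORT B =====
def expand_cols_py_alt (bases : List String) (all_cols : List String) : List String :=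
  -- one pass over all_cols: exact dict and the prefix index
  -- (prefix_map.setdefault(k[:j], []).append(c) is Dict.modify with default [])
  let st : PySem.Dict String String × PySem.Dict String (List String) :=
    all_cols.foldl (fun st c =>
      (st.1.insert (pyCanon c) c,
       (PySem.List.pyRange 0 (PySem.Str.len (pyCanon c) + 1) 1).foldl
         (fun m j => m.modify (PySem.Str.slice (pyCanon c) none (some j)) [] (fun v => v ++ [c])) st.2))
      (PySem.Dict.empty, PySem.Dict.empty)
  let out : List String :=
    bases.foldl (fun out base =>
      match st.1.get? (pyCanon base) with
      | some v => out ++ [v]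
      | none =>
          -- matches = prefix_map.get(key, []); empty = the KeyError case, excluded by Pre_
          out ++ st.2.getD (pyCanon base) []) []
  PySem.List.dedup out

-- ===== PRECONDITION & SPEC =====
-- Pre_ excludes exactly the inputs on which Python A raises KeyError: some base
-- whose canon is neither the canon of a column nor a prefix of one.
def Pre_expand_cols_py (bases : List String) (all_cols : List String) : Prop :=
  ∀ base ∈ bases, ∃ c ∈ all_cols, PySem.Str.startswith (pyCanon c) (pyCanon base) = true
instance (bases : List String) (all_cols : List String) : Decidable (Pre_expand_cols_py bases all_cols) := by unfold Pre_expand_cols_py; infer_instance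

def pvWitness_expand_cols_py : List String × List String := (["Col-A", "col"], ["Col-A", "Col-B", "other"])

def Spec_expand_cols_py (bases : List String) (all_cols : List String) (out : List String) : Prop := out = expand_cols_py_alt bases all_cols
instance (bases : List String) (all_cols : List String) (out : List String) : Decidable (Spec_expand_cols_py bases all_cols out) := by unfold Spec_expand_cols_py; infer_instance

-- ===== CLAIM (what is proved, stated in full; the proofs are below) =====
def Claim_equal_expand_cols_py : Prop := ∀ (bases : List String) (all_cols : List String), Dom_expand_cols_py bases all_cols → Pre_expand_cols_py bases all_cols → Spec_expand_cols_py bases all_cols (expand_cols_py bases all_cols)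

-- ===== LEMMAS AND PROOFS =====

-- s[:j] == key (String) is take j == key (List Char)
lemma sliceBeq (k key : String) (j : Nat) :
    (PySem.Str.slice k none (some (j : Int)) == key) = (k.toList.take j == key.toList) := by
  by_cases h : k.toList.take j = key.toList
  · have hs : PySem.Str.slice k none (some (j : Int)) = key := by
      apply String.ext
      simpa [PySem.Str.toList_slice, PySem.Chars.slice_eq_listSlice, PySem.List.slice_to_natCast] using h
    rw [hs, beq_self_eq_true]
    exact (beq_iff_eq.mpr h).symm
  · have hs : PySem.Str.slice k none (some (j : Int)) ≠ key := by
      intro he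
      apply h
      rw [← he]
      simp [PySem.Str.toList_slice, PySem.Chars.slice_eq_listSlice, PySem.List.slice_to_natCast]
    rw [beq_eq_false_iff_ne.mpr hs, beq_eq_false_iff_ne.mpr h]

-- among j = 0..len cs, exactly one prefix cs.take j equals key — iff key is a prefix
lemma filter_take_beq (cs key : List Char) :
    (List.range (cs.length + 1)).filter (fun j => cs.take j == key)
      = if key <+: cs then [key.length] else [] := by
  by_cases h : key <+: cs
  · rw [if_pos h]
    have hlen : key.length ≤ cs.length := h.length_le
    have htake : cs.take key.length = key := (List.prefix_iff_eq_take.mp h).symm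
    have hcongr : ∀ j ∈ List.range (cs.length + 1), (cs.take j == key) = (j == key.length) := by
      intro j hj
      rw [List.mem_range] at hj
      by_cases hje : j = key.length
      · subst hje; simp [htake]
      · have hne : cs.take j ≠ key := by
          intro he
          apply hje
          have hlj := congrArg List.length he
          rw [List.length_take] at hlj
          omega
        simp [hne, hje]
    rw [List.filter_congr hcongr, List.filter_beq,
        List.count_eq_one_of_mem List.nodup_range (List.mem_range.mpr (by omega)),
        List.replicate_one]
  · rw [if_neg h]
    rw [List.filter_eq_nil_iff]
    intro j _
    simp only [beq_iff_eq]
    intro he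
    exact h (he ▸ List.take_prefix j cs)

-- effect of one column's inner prefix loop on one key of the prefix index
lemma getD_one_col (k c : String) (m : PySem.Dict String (List String)) (key : String) :
    ((PySem.List.pyRange 0 (PySem.Str.len k + 1) 1).foldl
        (fun m j => m.modify (PySem.Str.slice k none (some j)) [] (fun v => v ++ [c])) m).getD key []
      = m.getD key [] ++ (if PySem.Str.startswith k key then [c] else []) := by
  have hlen : PySem.Str.len k + 1 = ((k.toList.length + 1 : Nat) : Int) := by
    rw [PySem.Str.len_eq]; push_cast; ring
  rw [hlen, PySem.List.pyRange_zero_natCast, List.foldl_map]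
  have h2 : (List.range (k.toList.length + 1)).foldl
        (fun m (j : Nat) => m.modify (PySem.Str.slice k none (some (j : Int))) [] (fun v => v ++ [c])) m
      = ((List.range (k.toList.length + 1)).map
            (fun j : Nat => (PySem.Str.slice k none (some (j : Int)), c))).foldl
          (fun m p => m.modify p.1 [] (fun v => v ++ [p.2])) m := by
    rw [List.foldl_map]
  rw [h2, PySem.Dict.getD_foldl_modify_append]
  congr 1
  rw [List.filter_map, List.map_map]
  have hc : ((fun p : String × String => p.1 == key) ∘ fun j : Nat => (PySem.Str.slice k none (some (j : Int)), c))
      = fun j : Nat => (k.toList.take j == key.toList) := by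
    funext j; simp only [Function.comp]; exact sliceBeq k key j
  rw [hc, filter_take_beq k.toList key.toList, PySem.Str.startswith_eq]
  by_cases hp : key.toList <+: k.toList
  · rw [if_pos hp, if_pos ((PySem.Chars.startswith_iff _ _).mpr hp)]
    simp
  · rw [if_neg hp, if_neg (by
      intro hb
      exact hp ((PySem.Chars.startswith_iff _ _).mp hb))]
    simp

-- the whole prefix index, looked up at one key, is exactly A's filter
lemma getD_pmap (cols : List String) (m : PySem.Dict String (List String)) (key : String) :
    (cols.foldl (fun m c =>
        (PySem.List.pyRange 0 (PySem.Str.len (pyCanon c) + 1) 1).foldl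
          (fun m j => m.modify (PySem.Str.slice (pyCanon c) none (some j)) [] (fun v => v ++ [c])) m) m).getD key []
      = m.getD key [] ++ cols.filter (fun c => PySem.Str.startswith (pyCanon c) key) := by
  induction cols generalizing m with
  | nil => rw [List.foldl_nil, List.filter_nil, List.append_nil]
  | cons c rest ih =>
      rw [List.foldl_cons, ih, getD_one_col, List.filter_cons]
      by_cases hs : PySem.Str.startswith (pyCanon c) key = true
      · rw [if_pos hs, if_pos hs, List.append_assoc, List.singleton_append]
      · rw [if_neg hs, if_neg hs, List.append_nil]

theorem expand_cols_eq (bases all_cols : List String) :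
    expand_cols_py bases all_cols = expand_cols_py_alt bases all_cols := by
  unfold expand_cols_py expand_cols_py_alt
  dsimp only
  rw [PySem.List.foldl_prod_mk
      (f := fun (d : PySem.Dict String String) c => d.insert (pyCanon c) c)
      (g := fun (m : PySem.Dict String (List String)) c =>
        (PySem.List.pyRange 0 (PySem.Str.len (pyCanon c) + 1) 1).foldl
          (fun m j => m.modify (PySem.Str.slice (pyCanon c) none (some j)) [] (fun v => v ++ [c])) m)]
  dsimp only
  congr 1
  apply PySem.List.foldl_congr_mem
  intro out base _
  cases h : (all_cols.foldl (fun d c => d.insert (pyCanon c) c) PySem.Dict.empty).get? (pyCanon base) with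
  | some v => rfl
  | none =>
      rw [getD_pmap all_cols PySem.Dict.empty (pyCanon base), PySem.Dict.getD_empty,
          List.nil_append]

-- ===== VERDICT (by name: the statement is the Claim_ definition above) =====
theorem expand_cols_py_spec : Claim_equal_expand_cols_py := by
  intro bases all_cols _ _
  unfold Spec_expand_cols_py
  exact expand_cols_eq bases all_cols
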